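-- pv_equiv track=rewrite | github.com/SynMac222/amazon-OA | 4SUMII.py | shoppingOptions
-- ===== SOURCE A (Python) =====
-- def shoppingOptions(pairOfJeans, pairOfShoes, pairOfSkirts, pairOfTops, dollars):
--     sum_dict = dict()
--     count = 0
--     for i in range(len(pairOfJeans)):
--         for j in range(len(pairOfShoes)):
--             sum_val = pairOfJeans[i] + pairOfShoes[j]
--             if sum_val in sum_dict:
--                 sum_dict[sum_val] +=1
--             else:
--                 sum_dict[sum_val] =1
--
--     for c in range(len(pairOfSkirts)):
--         for d in range(len(pairOfTops)):
--             cur_val = dollars - pairOfSkirts[c] - pairOfTops[d]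
--             possible_sum = [key for key in sum_dict if key <= cur_val]
--             value = [sum_dict.get(key) for key in possible_sum]
--             count += sum(value)
--
--     return count
-- ===== SOURCE B (Python) =====
-- def _bisect_right(a, x):
--     lo, hi = 0, len(a)
--     while lo < hi:
--         mid = (lo + hi) // 2
--         if x < a[mid]:
--             hi = mid
--         else:
--             lo = mid + 1
--     return lo
--
--
-- def shoppingOptions(pairOfJeans, pairOfShoes, pairOfSkirts, pairOfTops, dollars):
--     sums = sorted(j + s for j in pairOfJeans for s in pairOfShoes)
--     count = 0
--     for sk in pairOfSkirts:
--         for t in pairOfTops: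
--             count += _bisect_right(sums, dollars - sk - t)
--     return count
-- ===== Notes on version B (the rewrite author's own statement) =====
-- stated objective: faster
-- what changed: Replaces A's dict of pair-sums scanned in full for every skirt+top pair by one sorted list of jeans+shoes sums queried with a hand-written binary search (bisect_right) per pair.
import Mathlib
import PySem

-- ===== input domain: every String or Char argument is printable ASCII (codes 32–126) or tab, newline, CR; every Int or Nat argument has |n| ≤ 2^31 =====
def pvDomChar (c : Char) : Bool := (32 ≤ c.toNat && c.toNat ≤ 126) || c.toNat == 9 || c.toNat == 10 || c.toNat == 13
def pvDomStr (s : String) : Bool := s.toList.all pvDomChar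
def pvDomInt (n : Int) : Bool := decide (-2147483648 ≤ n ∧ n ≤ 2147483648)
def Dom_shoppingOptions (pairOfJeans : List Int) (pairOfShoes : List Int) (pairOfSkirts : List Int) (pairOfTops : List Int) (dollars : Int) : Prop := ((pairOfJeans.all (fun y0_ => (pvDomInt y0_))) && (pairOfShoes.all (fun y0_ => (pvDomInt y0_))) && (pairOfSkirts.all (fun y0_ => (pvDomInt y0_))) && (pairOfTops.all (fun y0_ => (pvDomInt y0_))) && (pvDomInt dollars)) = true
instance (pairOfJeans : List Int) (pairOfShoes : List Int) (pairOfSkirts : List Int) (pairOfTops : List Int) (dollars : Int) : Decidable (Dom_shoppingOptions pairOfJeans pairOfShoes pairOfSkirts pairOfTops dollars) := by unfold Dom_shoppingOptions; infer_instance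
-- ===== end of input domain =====

-- B replaces A's quadratic-per-query dict scan by one sorted list of jeans+shoes sums and a
-- hand-written binary search per skirt+top pair (alternative algorithm; asymptotically faster queries).

-- ===== PORT A =====
def shoppingOptions (pairOfJeans : List Int) (pairOfShoes : List Int) (pairOfSkirts : List Int) (pairOfTops : List Int) (dollars : Int) : Int :=
  let sumDict : PySem.Dict Int Int :=
    (PySem.List.pyRange 0 (PySem.List.len pairOfJeans)).foldl (fun d i =>
      (PySem.List.pyRange 0 (PySem.List.len pairOfShoes)).foldl (fun d j =>
        let sumVal := PySem.List.pyGetD pairOfJeans i 0 + PySem.List.pyGetD pairOfShoes j 0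
        if d.contains sumVal then d.insert sumVal (d.getD sumVal 0 + 1)
        else d.insert sumVal 1) d) PySem.Dict.empty
  (PySem.List.pyRange 0 (PySem.List.len pairOfSkirts)).foldl (fun count c =>
    (PySem.List.pyRange 0 (PySem.List.len pairOfTops)).foldl (fun count d =>
      let curVal := dollars - PySem.List.pyGetD pairOfSkirts c 0 - PySem.List.pyGetD pairOfTops d 0
      let possibleSum := sumDict.keys.filter (fun k => decide (k ≤ curVal))
      -- sum_dict.get(key) always hits (key comes from the dict), so it is its value:
      let value := possibleSum.map (fun k => sumDict.getD k 0)
      count + value.sum) count) 0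

-- ===== PORT B =====
-- B's hand-written bisect_right (`while lo < hi` loop)
def pvBisectLoop (a : List Int) (x : Int) (lo hi : Int) : Int :=
  if h : lo < hi then
    let mid := PySem.Int.floordiv (lo + hi) 2
    if x < PySem.List.pyGetD a mid 0 then pvBisectLoop a x lo mid
    else pvBisectLoop a x (mid + 1) hi
  else lo
termination_by (hi - lo).toNat
decreasing_by
  · have := PySem.Int.floordiv_two_mid_bounds (le_of_lt h)
    have hlt : PySem.Int.floordiv (lo + hi) 2 < hi :=
      (PySem.Int.floordiv_lt_iff_lt_mul (by norm_num)).mpr (by omega)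
    omega
  · have := PySem.Int.floordiv_two_mid_bounds (le_of_lt h)
    have hlt : PySem.Int.floordiv (lo + hi) 2 < hi :=
      (PySem.Int.floordiv_lt_iff_lt_mul (by norm_num)).mpr (by omega)
    omega

def pvBisectRight (a : List Int) (x : Int) : Int := pvBisectLoop a x 0 (PySem.List.len a)

def shoppingOptions_alt (pairOfJeans : List Int) (pairOfShoes : List Int) (pairOfSkirts : List Int) (pairOfTops : List Int) (dollars : Int) : Int :=
  let sums := PySem.List.sorted (pairOfJeans.flatMap (fun j => pairOfShoes.map (fun s => j + s))) (fun x => x)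
  pairOfSkirts.foldl (fun count sk =>
    pairOfTops.foldl (fun count t => count + pvBisectRight sums (dollars - sk - t)) count) 0

-- ===== PRECONDITION & SPEC =====
def Spec_shoppingOptions (pairOfJeans : List Int) (pairOfShoes : List Int) (pairOfSkirts : List Int) (pairOfTops : List Int) (dollars : Int) (out : Int) : Prop := out = shoppingOptions_alt pairOfJeans pairOfShoes pairOfSkirts pairOfTops dollars
instance (pairOfJeans : List Int) (pairOfShoes : List Int) (pairOfSkirts : List Int) (pairOfTops : List Int) (dollars : Int) (out : Int) : Decidable (Spec_shoppingOptions pairOfJeans pairOfShoes pairOfSkirts pairOfTops dollars out) := by unfold Spec_shoppingOptions; infer_instance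

-- ===== CLAIM (what is proved, stated in full; the proofs are below) =====
def Claim_equal_shoppingOptions : Prop := ∀ (pairOfJeans : List Int) (pairOfShoes : List Int) (pairOfSkirts : List Int) (pairOfTops : List Int) (dollars : Int), Dom_shoppingOptions pairOfJeans pairOfShoes pairOfSkirts pairOfTops dollars → Spec_shoppingOptions pairOfJeans pairOfShoes pairOfSkirts pairOfTops dollars (shoppingOptions pairOfJeans pairOfShoes pairOfSkirts pairOfTops dollars)

-- ===== LEMMAS AND PROOFS =====

-- a nested index loop over two lists is a fold over the flat list of pairwise sums
theorem pvNestedIndexFold {beta : Type} (J S : List Int) (g : beta → Int → beta) (init : beta) :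
    (PySem.List.pyRange 0 (PySem.List.len J)).foldl (fun d i =>
      (PySem.List.pyRange 0 (PySem.List.len S)).foldl
        (fun d j => g d (PySem.List.pyGetD J i 0 + PySem.List.pyGetD S j 0)) d) init
    = (J.flatMap (fun a => S.map (fun b => a + b))).foldl g init := by
  rw [List.foldl_flatMap]
  rw [PySem.List.foldl_pyRange_pyGetD J 0
      (fun d a => (PySem.List.pyRange 0 (PySem.List.len S)).foldl
        (fun d j => g d (a + PySem.List.pyGetD S j 0)) d) init (le_refl 0)]
  simp only [Int.toNat_zero, List.drop_zero]
  refine PySem.List.foldl_congr_mem _ _ _ _ ?_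
  intro acc a _
  rw [PySem.List.foldl_pyRange_pyGetD S 0 (fun d b => g d (a + b)) acc (le_refl 0)]
  simp only [Int.toNat_zero, List.drop_zero, List.foldl_map]

-- an absent key reads as the default
theorem pvGetD_of_not_contains (d : PySem.Dict Int Int) (k : Int) (h : d.contains k = false) :
    d.getD k 0 = 0 := by
  have : d.items.find? (fun p => p.1 == k) = none := by
    rw [List.find?_eq_none]
    intro p hp
    simp [PySem.Dict.contains] at h
    simpa using h p.1 p.2 hp
  simp [PySem.Dict.getD, PySem.Dict.get?, this]

-- A's manual counting step is Dict.counter's step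
theorem pvBuild_eq_counter (L : List Int) :
    L.foldl (fun d x => if d.contains x then d.insert x (d.getD x 0 + 1) else d.insert x 1)
      (PySem.Dict.empty : PySem.Dict Int Int)
    = PySem.Dict.counter L := by
  unfold PySem.Dict.counter
  refine PySem.List.foldl_congr_mem _ _ _ _ ?_
  intro d x _
  by_cases h : d.contains x
  · simp [PySem.Dict.modify, h]
  · simp only [Bool.not_eq_true] at h
    simp [PySem.Dict.modify, h, pvGetD_of_not_contains d x h]

-- A's per-query dict scan counts the sums ≤ cur
theorem pvDictScan_eq_countP (L : List Int) (cur : Int) :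
    (((PySem.Dict.counter L).keys.filter (fun k => decide (k ≤ cur))).map
        (fun k => (PySem.Dict.counter L).getD k 0)).sum
    = ((L.countP (fun y => decide (y ≤ cur)) : Nat) : Int) := by
  rw [PySem.Dict.keys_counter]
  have hmap : (((PySem.Set.ofList L).filter (fun k => decide (k ≤ cur))).map
        (fun k => (PySem.Dict.counter L).getD k 0))
      = (((PySem.Set.ofList L).filter (fun k => decide (k ≤ cur))).map
        (fun k => ((L.count k : Nat) : Int))) := by
    refine List.map_congr_left ?_
    intro k _
    exact PySem.Dict.getD_counter L k
  rw [hmap]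
  have hperm : ((PySem.Set.ofList L).filter (fun k => decide (k ≤ cur))).Perm
      ((L.dedup).filter (fun k => decide (k ≤ cur))) := by
    refine List.Perm.filter _ ?_
    refine (List.perm_ext_iff_of_nodup (PySem.Set.nodup_ofList L) L.nodup_dedup).mpr ?_
    intro a
    rw [PySem.Set.mem_ofList, List.mem_dedup]
  rw [List.Perm.sum_eq (hperm.map _)]
  rw [← List.sum_map_count_dedup_filter_eq_countP (fun k => decide (k ≤ cur)) L]
  rw [Nat.cast_list_sum, List.map_map]
  rfl

-- positional split: if everything before position n satisfies p and nothing from n on does,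
-- countP p = n
theorem pvCountP_of_split (a : List Int) (p : Int → Bool) (n : Nat) (hn : n ≤ a.length)
    (h1 : ∀ j (hj : j < a.length), j < n → p a[j] = true)
    (h2 : ∀ j (hj : j < a.length), n ≤ j → p a[j] = false) :
    a.countP p = n := by
  have hsplit : a = a.take n ++ a.drop n := (List.take_append_drop n a).symm
  rw [hsplit, List.countP_append]
  have htake : (a.take n).countP p = (a.take n).length := by
    rw [List.countP_eq_length]
    intro y hy
    obtain ⟨i, hi, rfl⟩ := List.mem_iff_getElem.mp hy
    rw [List.getElem_take]
    exact h1 i (by simp at hi; omega) (by simp at hi; omega)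
  have hdrop : (a.drop n).countP p = 0 := by
    rw [List.countP_eq_zero]
    intro y hy
    obtain ⟨i, hi, rfl⟩ := List.mem_iff_getElem.mp hy
    rw [List.getElem_drop]
    simp only [Bool.not_eq_true]
    exact h2 (n + i) (by simp at hi; omega) (by omega)
  rw [htake, hdrop, List.length_take]
  omega

-- the binary-search loop computes countP (· ≤ x) on a sorted list
theorem pvBisectLoop_eq (a : List Int) (x : Int) (hs : List.Pairwise (· ≤ ·) a) :
    ∀ (n : Nat) (lo hi : Int), (hi - lo).toNat = n → 0 ≤ lo → lo ≤ hi → hi ≤ a.length →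
    (∀ j (hj : j < a.length), (j : Int) < lo → a[j] ≤ x) →
    (∀ j (hj : j < a.length), hi ≤ (j : Int) → x < a[j]) →
    pvBisectLoop a x lo hi = ((a.countP (fun y => decide (y ≤ x)) : Nat) : Int) := by
  intro n
  induction n using Nat.strong_induction_on with
  | _ n ih =>
    intro lo hi hn h0 hle hhi hlow hhigh
    rw [pvBisectLoop]
    by_cases h : lo < hi
    · simp only [h, dif_pos]
      have hmid := PySem.Int.floordiv_two_mid_bounds (le_of_lt h)
      have hmidlt : PySem.Int.floordiv (lo + hi) 2 < hi :=
        (PySem.Int.floordiv_lt_iff_lt_mul (by norm_num)).mpr (by omega)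
      set mid := PySem.Int.floordiv (lo + hi) 2 with hmiddef
      have hmid0 : 0 ≤ mid := by omega
      have hmidlen : mid < (a.length : Int) := by omega
      have hget : PySem.List.pyGetD a mid 0 = a[mid.toNat]'(by omega) :=
        PySem.List.pyGetD_eq_getElem a 0 hmid0 hmidlen
      have hpw := List.pairwise_iff_getElem.mp hs
      by_cases hc : x < PySem.List.pyGetD a mid 0
      · simp only [hc, if_pos]
        refine ih ((mid - lo).toNat) (by omega) lo mid rfl h0 (by omega) (by omega) hlow ?_
        intro j hj hmj
        rcases eq_or_lt_of_le hmj with heq | hlt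
        · have : j = mid.toNat := by omega
          subst this
          rw [hget] at hc; exact hc
        · have h1 : a[mid.toNat]'(by omega) ≤ a[j] := by
            rcases lt_or_eq_of_le (show mid.toNat ≤ j by omega) with hh | hh
            · exact hpw mid.toNat j (by omega) hj hh
            · omega
          rw [hget] at hc; omega
      · simp only [hc, if_neg, not_false_iff]
        refine ih ((hi - (mid + 1)).toNat) (by omega) (mid + 1) hi rfl (by omega) (by omega) hhi ?_ hhigh
        intro j hj hmj
        rw [not_lt] at hc
        rw [hget] at hc
        rcases lt_or_eq_of_le (show (j : Int) ≤ mid by omega) with hh | hh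
        · have : a[j] ≤ a[mid.toNat]'(by omega) := hpw j mid.toNat hj (by omega) (by omega)
          omega
        · have : j = mid.toNat := by omega
          subst this; exact hc
    · simp only [h, dif_neg, not_false_iff]
      have heq : lo = hi := by omega
      have hcount : a.countP (fun y => decide (y ≤ x)) = lo.toNat := by
        refine pvCountP_of_split a _ lo.toNat (by omega) ?_ ?_
        · intro j hj hlt
          simp only [decide_eq_true_eq]
          exact hlow j hj (by omega)
        · intro j hj hge
          simp only [decide_eq_false_iff_not, not_le]
          exact hhigh j hj (by omega)
      rw [hcount]
      omega

theorem pvBisectRight_eq (a : List Int) (x : Int) (hs : List.Pairwise (· ≤ ·) a) :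
    pvBisectRight a x = ((a.countP (fun y => decide (y ≤ x)) : Nat) : Int) := by
  unfold pvBisectRight
  refine pvBisectLoop_eq a x hs _ 0 (PySem.List.len a) rfl (le_refl 0) ?_ ?_ ?_ ?_
  · simp only [PySem.List.len]; omega
  · simp only [PySem.List.len]; omega
  · intro j hj hlt; omega
  · intro j hj hge
    exfalso
    simp only [PySem.List.len] at hge
    omega

-- ===== VERDICT (by name: the statement is the Claim_ definition above) =====
theorem shoppingOptions_spec : Claim_equal_shoppingOptions := by
  intro J S Sk T dollars _
  unfold Spec_shoppingOptions shoppingOptions shoppingOptions_alt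
  simp only []
  have h1 := pvNestedIndexFold J S
      (fun d x => if d.contains x then d.insert x (d.getD x 0 + 1) else d.insert x 1)
      (PySem.Dict.empty : PySem.Dict Int Int)
  beta_reduce at h1
  rw [h1, pvBuild_eq_counter]
  set L := J.flatMap (fun j => S.map (fun s => j + s)) with hL
  have hsorted := PySem.List.sorted_pairwise L (fun x => x)
  have hperm := PySem.List.sorted_perm L (fun x => x) false
  have hbr : ∀ x : Int, pvBisectRight (PySem.List.sorted L (fun x => x)) x
      = ((L.countP (fun y => decide (y ≤ x)) : Nat) : Int) := by
    intro x
    rw [pvBisectRight_eq _ _ hsorted, hperm.countP_eq]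
  simp only [pvDictScan_eq_countP L, hbr, sub_sub]
  have h2 := pvNestedIndexFold Sk T
      (fun count s => count + ((L.countP (fun y => decide (y ≤ dollars - s)) : Nat) : Int)) 0
  beta_reduce at h2
  rw [h2, List.foldl_flatMap]
  simp only [List.foldl_map]
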